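-- pv_equiv track=rewrite | github.com/d-keel/advent-of-code | 2025/2/driver.py | substringCheck
-- ===== SOURCE A (Python) =====
-- def substringCheck(startVal: int, endVal: int) -> list[int]:
--     invalids: list[int] = []
--     for num in range(startVal, endVal+1):
--         chNum: str = str(num)
--         for i in range(1, len(chNum)//2 + 1):
--             if  len(chNum) % i == 0:
--                 subStr: str = chNum[:i]
--                 if subStr * (len(chNum)//i) == chNum:
--                     invalids.append(num)
--                     break
--     return invalids
-- ===== SOURCE B (Python) =====
-- def substringCheck(startVal: int, endVal: int) -> list[int]:
--     invalids: list[int] = []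
--     for num in range(startVal, endVal + 1):
--         chNum = str(num)
--         if chNum in (chNum + chNum)[1:-1]:
--             invalids.append(num)
--     return invalids
-- ===== Notes on version B (the rewrite author's own statement) =====
-- stated objective: faster
-- what changed: B replaces A's per-number enumeration of divisor-length prefixes (subStr * (len//i) == chNum for each i up to len//2) with the classic string-rotation doubling trick: num's digits form a repeated substring iff str(num) occurs in (str(num)+str(num))[1:-1], one substring test per number.
import Mathlib
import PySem

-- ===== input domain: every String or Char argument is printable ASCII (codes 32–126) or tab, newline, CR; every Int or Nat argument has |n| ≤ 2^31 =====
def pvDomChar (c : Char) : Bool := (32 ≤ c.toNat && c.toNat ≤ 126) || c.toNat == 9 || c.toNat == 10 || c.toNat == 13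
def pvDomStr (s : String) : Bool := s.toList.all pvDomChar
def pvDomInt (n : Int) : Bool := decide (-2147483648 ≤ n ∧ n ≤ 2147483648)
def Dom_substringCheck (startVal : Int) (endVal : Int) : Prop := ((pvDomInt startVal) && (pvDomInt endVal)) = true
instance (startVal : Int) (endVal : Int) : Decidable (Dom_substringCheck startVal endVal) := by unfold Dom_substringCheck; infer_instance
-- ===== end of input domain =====

-- B replaces A's per-number divisor-prefix repetition check with the classic doubling trick
-- (str(num) occurs in (str(num)+str(num))[1:-1]); measured faster by a constant factor in Python.


-- ===== PORT A =====
-- inner 'for i in range(...)' loop with its break: appends num and stops on the first i that fits.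
-- 'subStr * (len(chNum)//i)' is ported as (List.replicate k subStr).flatten with k = (len//i).toNat,
-- exact for every Python int k (Python's s * k is "" for k ≤ 0, matching toNat).
def pvLoopA (num : Int) (chNum : List Char) (invalids : List Int) : List Int → List Int
  | [] => invalids
  | i :: rest =>
    if PySem.Int.mod (↑chNum.length) i = 0 then
      let subStr := PySem.List.slice chNum none (some i)
      if (List.replicate (PySem.Int.floordiv (↑chNum.length) i).toNat subStr).flatten = chNum then
        invalids ++ [num]
      else pvLoopA num chNum invalids rest
    else pvLoopA num chNum invalids rest

def substringCheck (startVal : Int) (endVal : Int) : List Int :=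
  (PySem.List.pyRange startVal (endVal + 1)).foldl
    (fun invalids num =>
      let chNum := PySem.Int.toChars num
      pvLoopA num chNum invalids
        (PySem.List.pyRange 1 (PySem.Int.floordiv (↑chNum.length) 2 + 1)))
    []

-- ===== PORT B =====
def substringCheck_alt (startVal : Int) (endVal : Int) : List Int :=
  (PySem.List.pyRange startVal (endVal + 1)).foldl
    (fun invalids num =>
      let chNum := PySem.Int.toChars num
      let doubled := PySem.List.slice (chNum ++ chNum) (some 1) (some (-1))
      if PySem.Chars.isIn chNum doubled then invalids ++ [num] else invalids)
    []

-- ===== PRECONDITION & SPEC =====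
def Spec_substringCheck (startVal : Int) (endVal : Int) (out : List Int) : Prop := out = substringCheck_alt startVal endVal
instance (startVal : Int) (endVal : Int) (out : List Int) : Decidable (Spec_substringCheck startVal endVal out) := by unfold Spec_substringCheck; infer_instance

-- ===== CLAIM (what is proved, stated in full; the proofs are below) =====
def Claim_equal_substringCheck : Prop := ∀ (startVal : Int) (endVal : Int), Dom_substringCheck startVal endVal → Spec_substringCheck startVal endVal (substringCheck startVal endVal)

-- ===== LEMMAS AND PROOFS =====

-- str(n) is never empty
theorem pv_tdc_len (b : Nat) : ∀ (fuel n : Nat) (ds : List Char), fuel ≥ 1 → ds.length < (Nat.toDigitsCore b fuel n ds).length := by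
  intro fuel
  induction fuel with
  | zero => intro n ds h; omega
  | succ f ih =>
    intro n ds _
    rw [Nat.toDigitsCore]
    by_cases h : n / b = 0
    · simp [h]
    · simp only [h, if_false]
      calc ds.length < ((n % b).digitChar :: ds).length := by simp
        _ ≤ _ := by
          rcases Nat.eq_zero_or_pos f with hf | hf
          · subst hf; rw [Nat.toDigitsCore]
          · exact Nat.le_of_lt (ih _ _ hf)

theorem pv_toChars_ne_nil (n : Int) : PySem.Int.toChars n ≠ [] := by
  unfold PySem.Int.toChars
  split
  · simp
  · have := pv_tdc_len 10 (n.toNat + 1) n.toNat [] (by omega)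
    intro h; rw [Nat.toDigits] at h; simp [h] at this

-- periodicity, in A's form: some admissible divisor length works
def pvCondA (s : List Char) (i : Int) : Bool :=
  (PySem.Int.mod (↑s.length) i = 0) &&
  ((List.replicate (PySem.Int.floordiv (↑s.length) i).toNat (PySem.List.slice s none (some i))).flatten = s)

theorem pv_loopA_eq (num : Int) (s : List Char) (inv : List Int) :
    ∀ is : List Int, pvLoopA num s inv is = if is.any (pvCondA s) then inv ++ [num] else inv := by
  intro is
  induction is with
  | nil => simp [pvLoopA]
  | cons i rest ih =>
    simp only [pvLoopA, List.any_cons, pvCondA]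
    by_cases h1 : PySem.Int.mod (↑s.length) i = 0
    · by_cases h2 : (List.replicate (PySem.Int.floordiv (↑s.length) i).toNat (PySem.List.slice s none (some i))).flatten = s
      · simp [h1, h2]
      · simp [h1, h2, ih]
    · simp [h1, ih]

-- a power of its own g-prefix is fixed by shifting g
theorem pv_shift_of_pow (t : List Char) (k : Nat) (hk : 1 ≤ k) :
    ((List.replicate k t).flatten).drop t.length ++ ((List.replicate k t).flatten).take t.length
      = (List.replicate k t).flatten := by
  obtain ⟨k', rfl⟩ : ∃ k', k = k' + 1 := ⟨k - 1, by omega⟩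
  have h1 : (List.replicate (k' + 1) t).flatten = t ++ (List.replicate k' t).flatten := by
    simp [List.replicate_succ]
  conv_lhs => rw [h1, List.take_left, List.drop_left]
  calc (List.replicate k' t).flatten ++ t = (List.replicate k' t ++ [t]).flatten := by simp
    _ = (List.replicate (k' + 1) t).flatten := by rw [← List.replicate_succ']

-- conversely: fixed by shifting g with g ∣ length makes it a power of its g-prefix
theorem pv_pow_of_shift (g : Nat) (_hg : 1 ≤ g) :
    ∀ (k : Nat) (s : List Char), s.length = g * k → s.drop g ++ s.take g = s →
      s = (List.replicate k (s.take g)).flatten := by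
  intro k
  induction k with
  | zero => intro s hlen _; simp_all [List.length_eq_zero_iff.mp (by omega)]
  | succ k ih =>
    intro s hlen hshift
    rcases Nat.eq_zero_or_pos k with hk | hk
    · subst hk
      have : g = s.length := by omega
      simp [this]
    · have hgk : g ≤ g * k := Nat.le_mul_of_pos_right g hk
      have hmul : g * (k + 1) = g * k + g := by ring
      have hgle : g ≤ (s.drop g).length := by simp; omega
      have htake : s.take g = (s.drop g).take g := by
        conv_lhs => rw [← hshift]
        rw [List.take_append_of_le_length hgle]
      have hshift' : (s.drop g).drop g ++ (s.drop g).take g = s.drop g := by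
        conv_rhs => rw [← hshift]
        rw [List.drop_append_of_le_length hgle, htake]
      have hlen' : (s.drop g).length = g * k := by simp [hlen]; omega
      have := ih (s.drop g) hlen' hshift'
      calc s = s.take g ++ s.drop g := (List.take_append_drop g s).symm
        _ = s.take g ++ (List.replicate k ((s.drop g).take g)).flatten := by rw [← this]
        _ = (List.replicate (k + 1) (s.take g)).flatten := by
              rw [← htake, List.replicate_succ]; simp

-- shift-fixed points are closed under multiples and gcd (Bezout)
theorem pv_rotate_fix_mul (s : List Char) (m t : Nat) (h : s.rotate m = s) : s.rotate (t * m) = s := by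
  induction t with
  | zero => simp
  | succ t ih => rw [Nat.succ_mul, ← List.rotate_rotate, ih, h]

theorem pv_rotate_fix_gcd (s : List Char) (m : Nat) (hn : 1 ≤ s.length)
    (h : s.rotate m = s) : s.rotate (Nat.gcd s.length m) = s := by
  set n := s.length with hns
  set g := Nat.gcd n m with hgs
  rcases Nat.lt_or_ge g n with hglt | hge
  · -- choose t ≥ 0 with t*m ≡ g (mod n) from Bezout
    have hbez : (g : Int) = n * Nat.gcdA n m + m * Nat.gcdB n m := Nat.gcd_eq_gcd_ab n m
    set x : Int := Nat.gcdB n m % n with hx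
    have hx0 : 0 ≤ x := Int.emod_nonneg _ (by omega)
    set t : Nat := x.toNat with ht
    have htx : (t : Int) = x := by simp [ht, Int.toNat_of_nonneg hx0]
    have h1 : (t : Int) ≡ Nat.gcdB n m [ZMOD (n : Int)] := by
      rw [htx, hx]
      show (Nat.gcdB n m % n) % (n : Int) = _ % n
      exact Int.emod_emod_of_dvd _ dvd_rfl
    have h2 : (t : Int) * m ≡ (Nat.gcdB n m) * m [ZMOD (n : Int)] := h1.mul_right _
    have h3 : (Nat.gcdB n m) * (m : Int) ≡ (g : Int) [ZMOD (n : Int)] :=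
      Int.modEq_iff_dvd.mpr ⟨Nat.gcdA n m, by rw [hbez]; ring⟩
    have h4 : ((t * m : Nat) : Int) % n = (g : Int) % n := by
      push_cast
      exact h2.trans h3
    have hmod : (t * m) % n = g % n := by exact_mod_cast h4
    have hgmod : g % n = g := Nat.mod_eq_of_lt hglt
    calc s.rotate g = s.rotate ((t * m) % n) := by rw [hmod, hgmod]
      _ = s.rotate (t * m) := List.rotate_mod s (t * m)
      _ = s := pv_rotate_fix_mul s m t h
  · have hgl : g ≤ n := Nat.le_of_dvd (by omega) (Nat.gcd_dvd_left n m)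
    have : g = n := le_antisymm hgl hge
    rw [this, hns]
    exact List.rotate_length s

-- the interior slice (s++s)[1:-1], rewritten as take/drop
theorem pv_interior_eq (s : List Char) (h : 1 ≤ s.length) :
    PySem.List.slice (s ++ s) (some 1) (some (-1))
      = ((s ++ s).drop 1).take (2 * s.length - 2) := by
  simp [PySem.List.slice]
  rw [show min 1 (s.length + s.length) = 1 by omega]
  rw [show s.length + s.length - 1 - 1 = 2 * s.length - 2 by omega, List.drop_one]

-- core: A's existential divisor check ⟺ s occurs in the interior of s++s (s nonempty)
theorem pv_core (s : List Char) (hn : 1 ≤ s.length) :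
    (PySem.List.pyRange 1 (PySem.Int.floordiv (↑s.length) 2 + 1)).any (pvCondA s) =
      PySem.Chars.isIn s (PySem.List.slice (s ++ s) (some 1) (some (-1))) := by
  have hfd : PySem.Int.floordiv (↑s.length) 2 = ((s.length / 2 : Nat) : Int) := by
    exact_mod_cast PySem.Int.floordiv_natCast s.length 2
  rw [pv_interior_eq s hn, hfd, Bool.eq_iff_iff]
  constructor
  · -- A's divisor check succeeds ⇒ s occurs in the interior of s ++ s
    intro hany
    rw [List.any_eq_true] at hany
    obtain ⟨i, hmem, hci⟩ := hany
    rw [PySem.List.mem_pyRange_one] at hmem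
    have hij : ((i.toNat : Int)) = i := Int.toNat_of_nonneg (by omega)
    set j := i.toNat with hj
    have hj1 : 1 ≤ j := by omega
    have hj2 : j ≤ s.length / 2 := by omega
    have h2j : 2 * j ≤ s.length := by
      have := (Nat.le_div_iff_mul_le (by omega)).mp hj2; omega
    have hjn : j ≤ s.length := by omega
    simp only [pvCondA, Bool.and_eq_true, decide_eq_true_eq] at hci
    obtain ⟨hmod, hrep⟩ := hci
    have hdvd : j ∣ s.length := by
      have := (PySem.Int.mod_eq_zero_iff_dvd (↑s.length) i).mp hmod
      rw [← hij] at this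
      exact_mod_cast this
    rw [PySem.List.slice_to s (by omega), ← hij, PySem.Int.floordiv_natCast, Int.toNat_natCast,
      Int.toNat_natCast] at hrep
    have hk2 : 2 ≤ s.length / j := (Nat.le_div_iff_mul_le (by omega)).mpr (by omega)
    have hshift := pv_shift_of_pow (s.take j) (s.length / j) (by omega)
    rw [hrep, List.length_take, min_eq_left hjn] at hshift
    rw [← PySem.Chars.exists_prefix_drop_iff_isIn]
    refine ⟨j - 1, ?_⟩
    rw [List.drop_take, List.drop_drop, show 1 + (j - 1) = j by omega, List.prefix_take_iff]
    constructor
    · rw [List.drop_append_of_le_length hjn]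
      have hcomm : s.drop j ++ s = s ++ s.drop j := by
        calc s.drop j ++ s = s.drop j ++ (s.take j ++ s.drop j) := by rw [List.take_append_drop]
          _ = (s.drop j ++ s.take j) ++ s.drop j := by rw [List.append_assoc]
          _ = s ++ s.drop j := by rw [hshift]
      rw [hcomm]
      exact List.prefix_append s _
    · omega
  · -- s occurs in the interior of s ++ s ⇒ some divisor works (via the gcd of length and offset)
    intro hin
    rw [← PySem.Chars.exists_prefix_drop_iff_isIn] at hin
    obtain ⟨jj, hpre⟩ := hin
    rw [List.drop_take, List.drop_drop] at hpre
    have hlenle := hpre.length_le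
    rw [List.length_take, List.length_drop, List.length_append] at hlenle
    have hjjn : jj + 2 ≤ s.length := by omega
    rw [List.prefix_take_iff] at hpre
    obtain ⟨hpre, -⟩ := hpre
    rw [List.drop_append_of_le_length (by omega : 1 + jj ≤ s.length)] at hpre
    set m := 1 + jj with hmdef
    have hs : s = s.drop m ++ s.take m := by
      have heq := List.prefix_iff_eq_take.mp hpre
      rw [List.take_append, List.take_of_length_le (by simp),
        show s.length - (s.drop m).length = m by simp; omega] at heq
      exact heq
    have hrot : s.rotate m = s := by
      rw [List.rotate_eq_drop_append_take (by omega), ← hs]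
    have hg1 : 1 ≤ Nat.gcd s.length m := Nat.gcd_pos_of_pos_left m (by omega)
    have hgdvd : Nat.gcd s.length m ∣ s.length := Nat.gcd_dvd_left s.length m
    have hgm : Nat.gcd s.length m ≤ m := Nat.le_of_dvd (by omega) (Nat.gcd_dvd_right s.length m)
    have hgn : Nat.gcd s.length m ≤ s.length := by omega
    have hrotg := pv_rotate_fix_gcd s m (by omega) hrot
    have hshiftg : s.drop (Nat.gcd s.length m) ++ s.take (Nat.gcd s.length m) = s := by
      rw [← List.rotate_eq_drop_append_take hgn]
      exact hrotg
    set g := Nat.gcd s.length m with hgdef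
    have hk2 : 2 ≤ s.length / g := by
      obtain ⟨c, hc⟩ := hgdvd
      have hcg : s.length / g = c := by rw [hc, Nat.mul_div_cancel_left _ (by omega)]
      rcases c with - | - | c
      · omega
      · omega
      · omega
    have h2g : 2 * g ≤ s.length := by
      have := (Nat.le_div_iff_mul_le (by omega : 0 < g)).mp hk2; omega
    have hpow := pv_pow_of_shift g hg1 (s.length / g) s (by rw [Nat.mul_div_cancel' hgdvd]) hshiftg
    rw [List.any_eq_true]
    refine ⟨(g : Int), ?_, ?_⟩
    · rw [PySem.List.mem_pyRange_one]
      have hghalf : g ≤ s.length / 2 := (Nat.le_div_iff_mul_le (by omega)).mpr (by omega)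
      constructor
      · exact_mod_cast hg1
      · exact_mod_cast (by omega : g < s.length / 2 + 1)
    · simp only [pvCondA, Bool.and_eq_true, decide_eq_true_eq]
      constructor
      · exact (PySem.Int.mod_eq_zero_iff_dvd _ _).mpr (Int.natCast_dvd_natCast.mpr hgdvd)
      · rw [PySem.List.slice_to s (by omega), PySem.Int.floordiv_natCast, Int.toNat_natCast,
          Int.toNat_natCast]
        exact hpow.symm

-- per-number agreement of the two loop bodies
theorem pv_body_eq (inv : List Int) (num : Int) :
    pvLoopA num (PySem.Int.toChars num) inv
        (PySem.List.pyRange 1 (PySem.Int.floordiv (↑(PySem.Int.toChars num).length) 2 + 1)) =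
      (if PySem.Chars.isIn (PySem.Int.toChars num)
            (PySem.List.slice (PySem.Int.toChars num ++ PySem.Int.toChars num) (some 1) (some (-1)))
        then inv ++ [num] else inv) := by
  have hne := pv_toChars_ne_nil num
  have hn : 1 ≤ (PySem.Int.toChars num).length := by
    cases h : PySem.Int.toChars num with
    | nil => exact absurd h hne
    | cons a l => simp
  rw [pv_loopA_eq, pv_core _ hn]

-- ===== VERDICT (by name: the statement is the Claim_ definition above) =====
theorem substringCheck_spec : Claim_equal_substringCheck := by
  intro startVal endVal _
  unfold Spec_substringCheck substringCheck substringCheck_alt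
  apply List.foldl_ext
  intro inv num _
  simpa using pv_body_eq inv num
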